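-- pv_equiv track=rewrite | github.com/Rooydoo/Fxtrading | fx_trader/src/data/economic_calendar.py | _extract_currencies
-- ===== SOURCE A (Python) =====
-- from typing import Any, Dict, List, Optional, Set
--
-- def _extract_currencies(symbol: str) -> Set[str]:
--     """通貨ペアから通貨を抽出"""
--     symbol = symbol.replace("_", "").upper()
--     currencies = set()
--
--     # 標準的な通貨コード
--     known_currencies = ["USD", "EUR", "JPY", "GBP", "AUD", "CAD", "CHF", "NZD"]
--
--     for curr in known_currencies:
--         if curr in symbol:
--             currencies.add(curr)
--
--     return currencies
-- ===== SOURCE B (Python) =====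
-- def _extract_currencies(symbol: str):
--     """通貨ペアから通貨を抽出"""
--     s = symbol.replace("_", "").upper()
--     known = {"USD", "EUR", "JPY", "GBP", "AUD", "CAD", "CHF", "NZD"}
--     found = set()
--     while len(s) >= 3:
--         if s[:3] in known:
--             found.add(s[:3])
--         s = s[1:]
--     return known & found
-- ===== Notes on version B (the rewrite author's own statement) =====
-- stated objective: alternative
-- what changed: Instead of running one substring search over the symbol per known currency code, B slides a single 3-character window over the normalized symbol (consuming it one character at a time), collects the windows that are known codes, and returns the intersection of the known-code set with the collected windows.
import Mathlib
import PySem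

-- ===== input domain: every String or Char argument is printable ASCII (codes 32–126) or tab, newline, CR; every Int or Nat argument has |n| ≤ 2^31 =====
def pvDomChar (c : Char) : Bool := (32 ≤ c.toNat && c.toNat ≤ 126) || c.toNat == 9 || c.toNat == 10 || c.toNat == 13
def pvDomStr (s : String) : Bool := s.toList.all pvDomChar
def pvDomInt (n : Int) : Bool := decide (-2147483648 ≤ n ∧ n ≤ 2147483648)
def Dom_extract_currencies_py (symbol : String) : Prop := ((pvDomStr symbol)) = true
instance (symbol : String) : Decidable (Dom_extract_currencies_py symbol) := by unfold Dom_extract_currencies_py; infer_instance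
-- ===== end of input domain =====

-- B replaces A's per-currency substring searches by a single 3-char window slide over the
-- normalized symbol, keeping windows that are known codes, then intersecting with the known
-- set (objective: alternative).

-- ===== PORT A =====
def extract_currencies_py (symbol : String) : List String :=
  let s := PySem.Str.upper (PySem.Str.replace symbol "_" "")
  let known_currencies : List String := ["USD", "EUR", "JPY", "GBP", "AUD", "CAD", "CHF", "NZD"]
  known_currencies.foldl
    (fun currencies curr =>
      if PySem.Str.isIn curr s then PySem.Set.add currencies curr else currencies)
    PySem.Set.empty

-- ===== PORT B =====
-- known = {"USD", "EUR", "JPY", "GBP", "AUD", "CAD", "CHF", "NZD"}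
def pvKnown : PySem.Set String :=
  PySem.Set.ofList ["USD", "EUR", "JPY", "GBP", "AUD", "CAD", "CHF", "NZD"]

-- while len(s) >= 3: if s[:3] in known: found.add(s[:3]); s = s[1:]
def pvWindowScan : List Char → PySem.Set String → PySem.Set String
  | a :: b :: c :: rest, found =>
      pvWindowScan (b :: c :: rest)
        (if PySem.Set.contains pvKnown (String.ofList [a, b, c])
         then PySem.Set.add found (String.ofList [a, b, c]) else found)
  | [], found => found
  | [_], found => found
  | [_, _], found => found

def extract_currencies_py_alt (symbol : String) : List String :=
  let s := PySem.Str.upper (PySem.Str.replace symbol "_" "")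
  PySem.Set.inter pvKnown (pvWindowScan s.toList PySem.Set.empty)

-- ===== PRECONDITION & SPEC =====
def Spec_extract_currencies_py (symbol : String) (out : List String) : Prop := out = extract_currencies_py_alt symbol
instance (symbol : String) (out : List String) : Decidable (Spec_extract_currencies_py symbol out) := by unfold Spec_extract_currencies_py; infer_instance

-- ===== CLAIM (what is proved, stated in full; the proofs are below) =====
def Claim_equal_extract_currencies_py : Prop := ∀ (symbol : String), Dom_extract_currencies_py symbol → Spec_extract_currencies_py symbol (extract_currencies_py symbol)

-- ===== LEMMAS AND PROOFS =====

lemma str_eq_ofList_iff (x : String) (l : List Char) : x = String.ofList l ↔ x.toList = l := by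
  constructor
  · rintro rfl; simp
  · intro h; subst h; simp

-- A length-3 infix of a::b::c::rest is the head window or an infix of the tail.
lemma infix_cons3 {l : List Char} {a b c : Char} {rest : List Char} (h : l.length = 3) :
    l <:+: a :: b :: c :: rest ↔ l = [a, b, c] ∨ l <:+: b :: c :: rest := by
  rw [List.infix_cons_iff, List.prefix_iff_eq_take, h]
  simp

-- Characterization of the window scan: it accumulates exactly the known 3-char windows.
lemma mem_windowScan (cs : List Char) (found : PySem.Set String) (x : String) :
    x ∈ pvWindowScan cs found ↔
      x ∈ found ∨ (PySem.Set.contains pvKnown x = true ∧ x.toList.length = 3 ∧ x.toList <:+: cs) := by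
  induction cs, found using pvWindowScan.induct with
  | case1 a b c rest found ih =>
    rw [pvWindowScan, ih]
    have hw : (String.ofList [a, b, c]).toList = [a, b, c] := by simp
    constructor
    · rintro (hf | ⟨hkx, h3, hinf⟩)
      · by_cases hk : PySem.Set.contains pvKnown (String.ofList [a, b, c]) = true
        · rw [if_pos hk, PySem.Set.mem_add] at hf
          rcases hf with hf | rfl
          · exact Or.inl hf
          · refine Or.inr ⟨hk, by simp, List.infix_cons_iff.2 (Or.inl ?_)⟩
            rw [hw]
            exact ⟨rest, rfl⟩
        · rw [if_neg hk] at hf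
          exact Or.inl hf
      · exact Or.inr ⟨hkx, h3,
          hinf.trans (List.IsSuffix.isInfix (List.suffix_cons a (b :: c :: rest)))⟩
    · rintro (hf | ⟨hkx, h3, hinf⟩)
      · left
        split
        · exact (PySem.Set.mem_add _ _ _).2 (Or.inl hf)
        · exact hf
      · rcases (infix_cons3 h3).1 hinf with hl | htail
        · have hx : x = String.ofList [a, b, c] := (str_eq_ofList_iff x _).2 hl
          subst hx
          left
          rw [if_pos hkx]
          exact (PySem.Set.mem_add _ _ _).2 (Or.inr rfl)
        · exact Or.inr ⟨hkx, h3, htail⟩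
  | case2 found =>
    rw [pvWindowScan]
    refine ⟨Or.inl, ?_⟩
    rintro (hf | ⟨_, h3, hinf⟩)
    · exact hf
    · rw [List.infix_nil.1 hinf] at h3
      simp at h3
  | case3 a found =>
    rw [pvWindowScan]
    refine ⟨Or.inl, ?_⟩
    rintro (hf | ⟨_, h3, hinf⟩)
    · exact hf
    · have := hinf.length_le
      simp only [List.length_cons, List.length_nil] at this
      omega
  | case4 a b found =>
    rw [pvWindowScan]
    refine ⟨Or.inl, ?_⟩
    rintro (hf | ⟨_, h3, hinf⟩)
    · exact hf
    · have := hinf.length_le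
      simp only [List.length_cons, List.length_nil] at this
      omega

-- A's conditional-add fold over a duplicate-free list is filtering.
lemma foldl_if_add_eq_filter (p : String → Bool) :
    ∀ (l : List String) (s : PySem.Set String), l.Nodup → (∀ x ∈ l, x ∉ s) →
      l.foldl (fun a x => if p x then PySem.Set.add a x else a) s = s ++ l.filter p := by
  intro l
  induction l with
  | nil => simp
  | cons x xs ih =>
    intro s hnd hd
    simp only [List.foldl_cons, List.filter_cons]
    by_cases hp : p x
    · rw [if_pos hp, if_pos hp,
        PySem.Set.add_of_not_mem (hd x (List.mem_cons_self)),
        ih (s ++ [x]) hnd.of_cons ?_]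
      · simp
      · intro y hy
        simp only [List.mem_append, List.mem_singleton]
        rintro (hys | rfl)
        · exact hd y (List.mem_cons_of_mem _ hy) hys
        · exact (List.nodup_cons.1 hnd).1 hy
    · rw [if_neg hp, if_neg hp, ih s hnd.of_cons (fun y hy => hd y (List.mem_cons_of_mem _ hy))]

-- ===== VERDICT (by name: the statement is the Claim_ definition above) =====
theorem extract_currencies_py_spec : Claim_equal_extract_currencies_py := by
  intro symbol _
  unfold Spec_extract_currencies_py extract_currencies_py extract_currencies_py_alt
  rw [foldl_if_add_eq_filter _ _ _ (by simp) (by simp [PySem.Set.empty])]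
  rw [show ∀ f, PySem.Set.inter pvKnown f = pvKnown.filter (fun x => PySem.Set.contains f x)
        from fun _ => rfl]
  have hnd : (["USD", "EUR", "JPY", "GBP", "AUD", "CAD", "CHF", "NZD"] : List String).Nodup := by
    simp
  rw [show pvKnown = ["USD", "EUR", "JPY", "GBP", "AUD", "CAD", "CHF", "NZD"] from by
        rw [pvKnown]; exact PySem.Set.ofList_eq_self_of_nodup _ hnd]
  simp only [PySem.Set.empty, List.nil_append]
  apply List.filter_congr
  intro c hc
  have h3 : c.toList.length = 3 := by fin_cases hc <;> simp
  have hmem : c ∈ pvKnown := by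
    rw [pvKnown, PySem.Set.mem_ofList]
    fin_cases hc <;> simp
  rw [Bool.eq_iff_iff, PySem.Str.isIn_iff_infix, PySem.Set.contains_iff, mem_windowScan]
  simp [h3, hmem]
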